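-- pv_equiv track=rewrite | github.com/Tyler-penguin/Base64 | from_base64.py | from_b64_chunk
-- ===== SOURCE A (Python) =====
-- def from_b64_chunk(b64_string):
--     new_string = ''
--     lookup_dict = {'A':0,'B':1,'C':2,'D':3,'E':4,'F':5,'G':6,'H':7,'I':8,'J':9,'K':10,'L':11,'M':12,'N':13,'O':14,'P':15,'Q':16,'R':17,'S':18,'T':19,'U':20,'V':21,'W':22,'X':23,'Y':24,'Z':25,'a':26,'b':27,'c':28,'d':29,'e':30,'f':31,'g':32,'h':33,'i':34,'j':35,'k':36,'l':37,'m':38,'n':39,'o':40,'p':41,'q':42,'r':43,'s':44,'t':45,'u':46,'v':47,'w':48,'x':49,'y':50,'z':51,'0':52,'1':53,'2':54,'3':55,'4':56,'5':57,'6':58,'7':59,'8':60,'9':61,'+':62,'/':63}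
--
--     additional = lookup_dict[b64_string[0]]
--     shift = 4
--     for character in b64_string[1:]:
--         char = lookup_dict[character]
--         new_string+=chr((additional<<(6-shift))|char>>shift)
--         additional = char&((1<<shift)-1)
--         shift-=2
--
--     return new_string
-- ===== SOURCE B (Python) =====
-- def from_b64_chunk(b64_string):
--     def b64_digit(c):
--         o = ord(c)
--         if 65 <= o <= 90:
--             return o - 65      # 'A'-'Z'
--         if 97 <= o <= 122:
--             return o - 71      # 'a'-'z'
--         if 48 <= o <= 57:
--             return o + 4       # '0'-'9'
--         if c == '+':
--             return 62
--         if c == '/':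
--             return 63
--         raise ValueError('invalid base64 character: %r' % c)
--     # pass 1: pack the whole chunk into one integer, 6 bits per character
--     value = 0
--     for character in b64_string:
--         value = value * 64 + b64_digit(character)
--     # pass 2: slice the packed integer into bytes from the high end
--     n = len(b64_string)
--     return ''.join(chr((value >> (6 * n - 8 * (i + 1))) & 0xFF) for i in range(n - 1))
-- ===== Notes on version B (the rewrite author's own statement) =====
-- stated objective: alternative
-- what changed: Replaced A's one-pass carry/shift state machine over a 64-entry lookup dict with a two-pass accumulate-then-slice structure using arithmetic on character codes: pack the chunk into one integer via ord-range digit computation, then extract each output byte from the high end with a closed-form shift.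
-- outside the precondition, e.g. on from_b64_chunk(''): A raises IndexError, B returns ''
import Mathlib
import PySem

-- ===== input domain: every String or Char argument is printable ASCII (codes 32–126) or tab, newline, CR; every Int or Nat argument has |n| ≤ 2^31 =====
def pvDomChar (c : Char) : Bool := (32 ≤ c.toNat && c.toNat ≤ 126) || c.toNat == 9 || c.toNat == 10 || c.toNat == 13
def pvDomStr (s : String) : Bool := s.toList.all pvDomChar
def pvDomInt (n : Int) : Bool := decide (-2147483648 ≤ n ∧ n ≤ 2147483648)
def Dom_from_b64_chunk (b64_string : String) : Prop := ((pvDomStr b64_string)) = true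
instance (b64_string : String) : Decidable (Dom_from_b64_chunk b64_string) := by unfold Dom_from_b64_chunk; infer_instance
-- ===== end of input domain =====

-- B replaces A's interleaved carry/shift state machine and its 64-entry lookup dict by a two-pass
-- accumulate-then-slice decomposition with ord-arithmetic digits (pack the chunk into one integer,
-- then extract each byte by a closed-form shift); same cost, alternative structure.


-- ===== PORT A =====
-- A's literal lookup_dict (values are small nonnegative ints, kept as Nat)
def b64Lookup : PySem.Dict Char Nat := PySem.Dict.mk  -- literal dict (all keys distinct)
  [('A',0),('B',1),('C',2),('D',3),('E',4),('F',5),('G',6),('H',7),('I',8),('J',9),('K',10),('L',11),('M',12),('N',13),('O',14),('P',15),('Q',16),('R',17),('S',18),('T',19),('U',20),('V',21),('W',22),('X',23),('Y',24),('Z',25),('a',26),('b',27),('c',28),('d',29),('e',30),('f',31),('g',32),('h',33),('i',34),('j',35),('k',36),('l',37),('m',38),('n',39),('o',40),('p',41),('q',42),('r',43),('s',44),('t',45),('u',46),('v',47),('w',48),('x',49),('y',50),('z',51),('0',52),('1',53),('2',54),('3',55),('4',56),('5',57),('6',58),('7',59),('8',60),('9',61),('+',62),('/',63)]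

-- A's for-loop over b64_string[1:], state (new_string, additional, shift); a KeyError
-- (missing lookup) or ValueError (negative shift, chunks longer than 4) is modelled by
-- returning [] — both are outside Pre_.
def fromB64LoopA : List Char → List Char → Nat → Int → List Char
  | [], acc, _, _ => acc
  | character :: rest, acc, additional, shift =>
    match b64Lookup.get? character with
    | none => []                                   -- KeyError, outside Pre_
    | some char =>
      if shift < 0 then []                         -- ValueError (negative shift), outside Pre_
      else fromB64LoopA rest
        (acc ++ [Char.ofNat ((additional <<< (6 - shift).toNat) ||| (char >>> shift.toNat))])
        (char &&& ((1 <<< shift.toNat) - 1)) (shift - 2)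

def from_b64_chunk (b64_string : String) : String :=
  match b64_string.toList with
  | [] => ""                                       -- IndexError on b64_string[0], outside Pre_
  | c0 :: rest =>
    match b64Lookup.get? c0 with
    | none => ""                                   -- KeyError, outside Pre_
    | some additional => String.ofList (fromB64LoopA rest [] additional 4)

-- ===== PORT B =====
-- Source B's b64_digit helper: ord-range arithmetic; none = its ValueError, outside Pre_
def b64Val (c : Char) : Option Nat :=
  let o := c.toNat
  if 65 ≤ o ∧ o ≤ 90 then some (o - 65)            -- 'A'-'Z'
  else if 97 ≤ o ∧ o ≤ 122 then some (o - 71)      -- 'a'-'z'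
  else if 48 ≤ o ∧ o ≤ 57 then some (o + 4)        -- '0'-'9'
  else if c = '+' then some 62
  else if c = '/' then some 63
  else none

-- pass 1 of Source B: value = value * 64 + b64_digit(character)
def packLoopB : List Char → Nat → Option Nat
  | [], value => some value
  | character :: rest, value =>
    match b64Val character with
    | none => none                                 -- ValueError, outside Pre_
    | some d => packLoopB rest (value * 64 + d)

-- pass 2 of Source B: chr((value >> (6*n - 8*(i+1))) & 0xFF) for i in range(n-1).
-- Nat subtraction truncates where Python's '>>' would raise ValueError on a negative
-- shift (only when n ≥ 5); exact on Pre_ (n ≤ 4), where 8*(i+1) ≤ 6*n always holds.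
def from_b64_chunk_alt (b64_string : String) : String :=
  let cs := b64_string.toList
  match packLoopB cs 0 with
  | none => ""                                     -- ValueError, outside Pre_
  | some value =>
    let n := cs.length
    String.ofList ((List.range (n - 1)).map (fun i => Char.ofNat ((value >>> (6 * n - 8 * (i + 1))) &&& 0xFF)))

-- ===== PRECONDITION & SPEC =====
def b64AlphabetChars : List Char :=
  ['A','B','C','D','E','F','G','H','I','J','K','L','M','N','O','P','Q','R','S','T','U','V','W','X','Y','Z',
   'a','b','c','d','e','f','g','h','i','j','k','l','m','n','o','p','q','r','s','t','u','v','w','x','y','z',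
   '0','1','2','3','4','5','6','7','8','9','+','/']

-- Exactly the inputs where A returns normally: A raises IndexError on '', KeyError on any
-- character outside the base64 alphabet, and ValueError (negative shift) on length ≥ 5.
def Pre_from_b64_chunk (b64_string : String) : Prop :=
  b64_string.toList ≠ [] ∧ b64_string.toList.length ≤ 4 ∧
    (b64_string.toList.all (b64AlphabetChars.contains ·)) = true
instance (b64_string : String) : Decidable (Pre_from_b64_chunk b64_string) := by
  unfold Pre_from_b64_chunk; infer_instance
def pvWitness_from_b64_chunk : String := "TWFu"

def Spec_from_b64_chunk (b64_string : String) (out : String) : Prop := out = from_b64_chunk_alt b64_string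
instance (b64_string : String) (out : String) : Decidable (Spec_from_b64_chunk b64_string out) := by unfold Spec_from_b64_chunk; infer_instance

-- ===== CLAIM (what is proved, stated in full; the proofs are below) =====
def Claim_equal_from_b64_chunk : Prop := ∀ (b64_string : String), Dom_from_b64_chunk b64_string → Pre_from_b64_chunk b64_string → Spec_from_b64_chunk b64_string (from_b64_chunk b64_string)

-- ===== LEMMAS AND PROOFS =====

-- every alphabet character: A's dict and B's ord-arithmetic agree on some value < 64
def pvLookupOk (c : Char) : Bool :=
  match b64Lookup.get? c, b64Val c with
  | some d, some e => d == e && decide (d < 64)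
  | _, _ => false

set_option maxRecDepth 10000 in
theorem pvLookupAllBool : b64AlphabetChars.all pvLookupOk = true := by rfl

theorem pvLookup_mem (c : Char) (hc : c ∈ b64AlphabetChars) :
    ∃ d, b64Lookup.get? c = some d ∧ b64Val c = some d ∧ d < 64 := by
  have h := List.all_eq_true.mp pvLookupAllBool c hc
  unfold pvLookupOk at h
  cases hg : b64Lookup.get? c with
  | none => rw [hg] at h; simp at h
  | some d =>
    cases hv : b64Val c with
    | none => rw [hg, hv] at h; simp at h
    | some e =>
      rw [hg, hv] at h
      simp only [Bool.and_eq_true, beq_iff_eq, decide_eq_true_eq] at h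
      refine ⟨d, rfl, ?_, h.2⟩
      exact congrArg some h.1.symm

-- bit-operation ↔ arithmetic bridges
theorem pvAnd255 (n : ℕ) : n &&& 255 = n % 256 := Nat.and_two_pow_sub_one_eq_mod n 8
theorem pvAnd15 (n : ℕ) : n &&& 15 = n % 16 := Nat.and_two_pow_sub_one_eq_mod n 4
theorem pvAnd3 (n : ℕ) : n &&& 3 = n % 4 := Nat.and_two_pow_sub_one_eq_mod n 2
theorem pvShl (a k : ℕ) : a <<< k = a * 2 ^ k := Nat.shiftLeft_eq a k
theorem pvShr (a k : ℕ) : a >>> k = a / 2 ^ k := Nat.shiftRight_eq_div_pow a k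
theorem pvOrLt (a b k : ℕ) (h : b < 2 ^ k) : (a * 2 ^ k) ||| b = a * 2 ^ k + b := by
  rw [Nat.mul_comm]; exact (Nat.two_pow_add_eq_or_of_lt h a).symm

-- the per-byte identities: A's carry/shift byte equals B's extracted byte
theorem pvByte21 (d1 d2 : ℕ) (h1 : d1 < 64) (h2 : d2 < 64) :
    (d1 <<< 2) ||| (d2 >>> 4) = ((d1 * 64 + d2) >>> 4) &&& 255 := by
  rw [pvShl, pvShr, pvShr, pvAnd255, pvOrLt d1 _ 2 (by norm_num; omega)]
  norm_num; omega

theorem pvByte31 (d1 d2 d3 : ℕ) (h1 : d1 < 64) (h2 : d2 < 64) (h3 : d3 < 64) :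
    (d1 <<< 2) ||| (d2 >>> 4) = (((d1 * 64 + d2) * 64 + d3) >>> 10) &&& 255 := by
  rw [pvShl, pvShr, pvShr, pvAnd255, pvOrLt d1 _ 2 (by norm_num; omega)]
  norm_num; omega

theorem pvByte32 (d1 d2 d3 : ℕ) (h3 : d3 < 64) :
    ((d2 &&& 15) <<< 4) ||| (d3 >>> 2) = (((d1 * 64 + d2) * 64 + d3) >>> 2) &&& 255 := by
  rw [pvAnd15, pvShl, pvShr, pvShr, pvAnd255, pvOrLt _ _ 4 (by norm_num; omega)]
  norm_num; omega

theorem pvByte41 (d1 d2 d3 d4 : ℕ) (h1 : d1 < 64) (h2 : d2 < 64) (h3 : d3 < 64) (h4 : d4 < 64) :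
    (d1 <<< 2) ||| (d2 >>> 4) = ((((d1 * 64 + d2) * 64 + d3) * 64 + d4) >>> 16) &&& 255 := by
  rw [pvShl, pvShr, pvShr, pvAnd255, pvOrLt d1 _ 2 (by norm_num; omega)]
  norm_num; omega

theorem pvByte42 (d1 d2 d3 d4 : ℕ) (h3 : d3 < 64) (h4 : d4 < 64) :
    ((d2 &&& 15) <<< 4) ||| (d3 >>> 2) = ((((d1 * 64 + d2) * 64 + d3) * 64 + d4) >>> 8) &&& 255 := by
  rw [pvAnd15, pvShl, pvShr, pvShr, pvAnd255, pvOrLt _ _ 4 (by norm_num; omega)]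
  norm_num; omega

theorem pvByte43 (d1 d2 d3 d4 : ℕ) (h4 : d4 < 64) :
    ((d3 &&& 3) <<< 6) ||| d4 = (((d1 * 64 + d2) * 64 + d3) * 64 + d4) &&& 255 := by
  rw [pvAnd3, pvShl, pvAnd255, pvOrLt _ _ 6 (by norm_num; omega)]
  norm_num; omega

-- the claim, over an explicit character list
set_option maxRecDepth 10000 in
theorem pvMainList (cs : List Char) (h1 : cs ≠ []) (h2 : cs.length ≤ 4)
    (h3 : ∀ c ∈ cs, c ∈ b64AlphabetChars) :
    from_b64_chunk (String.ofList cs) = from_b64_chunk_alt (String.ofList cs) := by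
  rcases cs with _ | ⟨c1, _ | ⟨c2, _ | ⟨c3, _ | ⟨c4, _ | ⟨c5, rest⟩⟩⟩⟩⟩
  · exact absurd rfl h1
  · obtain ⟨d1, e1, f1, b1⟩ := pvLookup_mem c1 (h3 c1 (by simp))
    simp [from_b64_chunk, from_b64_chunk_alt, fromB64LoopA, packLoopB, e1, f1]
  · obtain ⟨d1, e1, f1, b1⟩ := pvLookup_mem c1 (h3 c1 (by simp))
    obtain ⟨d2, e2, f2, b2⟩ := pvLookup_mem c2 (h3 c2 (by simp))
    simp [from_b64_chunk, from_b64_chunk_alt, fromB64LoopA, packLoopB, e1, e2, f1, f2,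
      List.range_succ]
    rw [pvByte21 d1 d2 b1 b2]
  · obtain ⟨d1, e1, f1, b1⟩ := pvLookup_mem c1 (h3 c1 (by simp))
    obtain ⟨d2, e2, f2, b2⟩ := pvLookup_mem c2 (h3 c2 (by simp))
    obtain ⟨d3, e3, f3, b3⟩ := pvLookup_mem c3 (h3 c3 (by simp))
    simp [from_b64_chunk, from_b64_chunk_alt, fromB64LoopA, packLoopB, e1, e2, e3,
      f1, f2, f3, List.range_succ]
    rw [pvByte31 d1 d2 d3 b1 b2 b3, pvByte32 d1 d2 d3 b3]
  · obtain ⟨d1, e1, f1, b1⟩ := pvLookup_mem c1 (h3 c1 (by simp))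
    obtain ⟨d2, e2, f2, b2⟩ := pvLookup_mem c2 (h3 c2 (by simp))
    obtain ⟨d3, e3, f3, b3⟩ := pvLookup_mem c3 (h3 c3 (by simp))
    obtain ⟨d4, e4, f4, b4⟩ := pvLookup_mem c4 (h3 c4 (by simp))
    simp [from_b64_chunk, from_b64_chunk_alt, fromB64LoopA, packLoopB, e1, e2, e3, e4,
      f1, f2, f3, f4, List.range_succ]
    rw [pvByte41 d1 d2 d3 d4 b1 b2 b3 b4, pvByte42 d1 d2 d3 d4 b3 b4,
        pvByte43 d1 d2 d3 d4 b4]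
  · simp at h2; omega

-- ===== VERDICT (by name: the statement is the Claim_ definition above) =====
theorem from_b64_chunk_spec : Claim_equal_from_b64_chunk := by
  intro s _ hpre
  obtain ⟨hne, hlen, hmem⟩ := hpre
  unfold Spec_from_b64_chunk
  have h := pvMainList s.toList hne hlen (fun c hc => by
    have := List.all_eq_true.mp hmem c hc; simpa using this)
  simpa using h
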